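-- pv_equiv track=rewrite | github.com/ayukyo/alltoolkit | Python/toml_utils/mod.py | _find_comment
-- ===== SOURCE A (Python) =====
-- DQUOTE = '"'
--
-- SQUOTE = "'"
--
-- def _find_comment(s: str) -> int:
--     """Find the start of a comment, respecting strings."""
--     in_string = False
--     string_char = None
--     for i, c in enumerate(s):
--         if in_string:
--             if c == string_char:
--                 in_string = False
--         else:
--             if c == DQUOTE or c == SQUOTE:
--                 in_string = True
--                 string_char = c
--             elif c == '#':
--                 return i
--     return -1
-- ===== SOURCE B (Python) =====
-- def _find_comment(s: str) -> int:
--     """Find the start of a comment, respecting strings."""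
--     i = 0
--     n = len(s)
--     while i < n:
--         c = s[i]
--         if c == '#':
--             return i
--         if c == '"' or c == "'":
--             j = s.find(c, i + 1)
--             if j == -1:
--                 return -1
--             i = j + 1
--         else:
--             i += 1
--     return -1
-- ===== Notes on version B (the rewrite author's own statement) =====
-- stated objective: alternative
-- what changed: Replaces the per-character in_string/string_char state machine with a skip-ahead scan: on an opening quote it jumps directly past the matching closing quote via str.find (returning -1 if the string is unterminated), so no string-state is ever maintained.
import Mathlib
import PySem

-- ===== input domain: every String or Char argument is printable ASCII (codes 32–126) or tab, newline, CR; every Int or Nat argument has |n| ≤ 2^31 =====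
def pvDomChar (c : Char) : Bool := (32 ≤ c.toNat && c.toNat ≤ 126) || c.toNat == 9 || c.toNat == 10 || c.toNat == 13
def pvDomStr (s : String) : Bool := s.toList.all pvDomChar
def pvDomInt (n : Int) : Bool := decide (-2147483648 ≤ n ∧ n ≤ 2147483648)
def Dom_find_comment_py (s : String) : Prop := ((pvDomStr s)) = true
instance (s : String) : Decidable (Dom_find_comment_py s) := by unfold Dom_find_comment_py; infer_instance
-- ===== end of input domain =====

-- B replaces A's in_string/string_char state machine by a skip-ahead scan that jumps past
-- each quoted region via a single find of the closing quote (objective: alternative).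

-- ===== PORT A =====
-- state machine: index i, in_string flag, string_char (None → Option.none)
def findCommentA : List Char → Int → Bool → Option Char → Int
  | [], _, _, _ => -1
  | c :: rest, i, inStr, sc =>
    if inStr then
      if some c = sc then findCommentA rest (i+1) false sc
      else findCommentA rest (i+1) true sc
    else
      if c = '"' ∨ c = '\'' then findCommentA rest (i+1) true (some c)
      else if c = '#' then i
      else findCommentA rest (i+1) false sc

def find_comment_py (s : String) : Int := findCommentA s.toList 0 false none

-- ===== PORT B =====
-- skip-ahead scan: s.find(c, i+1) becomes findIdx? on the remaining tail
def findCommentB : List Char → Int → Int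
  | [], _ => -1
  | c :: rest, i =>
    if c = '#' then i
    else if c = '"' ∨ c = '\'' then
      match h : rest.findIdx? (· = c) with
      | none => -1
      | some j => findCommentB (rest.drop (j+1)) (i + j + 2)
    else findCommentB rest (i+1)
termination_by l _ => l.length
decreasing_by
  all_goals (simp only [List.length_cons, List.length_drop]; omega)

def find_comment_py_alt (s : String) : Int := findCommentB s.toList 0

-- ===== PRECONDITION & SPEC =====
def Spec_find_comment_py (s : String) (out : Int) : Prop := out = find_comment_py_alt s
instance (s : String) (out : Int) : Decidable (Spec_find_comment_py s out) := by unfold Spec_find_comment_py; infer_instance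

-- ===== CLAIM (what is proved, stated in full; the proofs are below) =====
def Claim_equal_find_comment_py : Prop := ∀ (s : String), Dom_find_comment_py s → Spec_find_comment_py s (find_comment_py s)

-- ===== LEMMAS AND PROOFS =====

-- inside a string opened with q, A scans to the first q, then resumes out of string
theorem findCommentA_inStr (rest : List Char) (q : Char) : ∀ (i : Int),
    findCommentA rest i true (some q) =
      match rest.findIdx? (· = q) with
      | none => -1
      | some j => findCommentA (rest.drop (j+1)) (i + j + 1) false (some q) := by
  induction rest with
  | nil => intro i; simp [findCommentA, List.findIdx?_nil]
  | cons c rest ih =>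
    intro i
    by_cases hc : c = q
    · subst hc
      simp [findCommentA, List.findIdx?_cons]
    · have hne : ¬ (some c = some q) := by simp [hc]
      simp only [findCommentA, hne, if_false, ih (i+1)]
      have : (c :: rest).findIdx? (· = q) = (rest.findIdx? (· = q)).map (· + 1) := by
        simp [List.findIdx?_cons, hc]
      rw [this]
      cases rest.findIdx? (· = q) with
      | none => simp
      | some j =>
        simp only [Option.map_some]
        have harith : i + 1 + (j : Int) + 1 = i + ((j : Int) + 1) + 1 := by ring
        simp only [List.drop_succ_cons, if_true]
        push_cast
        rw [harith]

-- out of a string, A's string_char is irrelevant and A agrees with B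
theorem findCommentA_eq_B_aux : ∀ (n : ℕ) (l : List Char), l.length ≤ n →
    ∀ (i : Int) (sc : Option Char), findCommentA l i false sc = findCommentB l i := by
  intro n
  induction n with
  | zero =>
    intro l hl i sc
    have : l = [] := by cases l <;> simp_all
    subst this
    simp [findCommentA, findCommentB]
  | succ n ih =>
    intro l hl i sc
    cases l with
    | nil => simp [findCommentA, findCommentB]
    | cons c rest =>
      by_cases hq : c = '"' ∨ c = '\''
      · have hch : ¬ c = '#' := by rcases hq with h | h <;> subst h <;> decide
        have hA : findCommentA (c :: rest) i false sc =
            findCommentA rest (i+1) true (some c) := by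
          simp [findCommentA, hq]
        rw [hA, findCommentA_inStr]
        rw [findCommentB]
        simp only [if_neg hch, if_pos hq]
        cases hfi : rest.findIdx? (· = c) with
        | none => simp
        | some j =>
          simp only []
          have hlen : (rest.drop (j+1)).length ≤ n := by
            have := List.length_drop (l := rest) (i := j+1)
            simp at hl
            omega
          rw [ih _ hlen]
          congr 1
          ring
      · by_cases hch : c = '#'
        · subst hch
          have hA : findCommentA ('#' :: rest) i false sc = i := by
            simp [findCommentA]
          rw [hA, findCommentB]
          simp
        · have hA : findCommentA (c :: rest) i false sc =
              findCommentA rest (i+1) false sc := by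
            simp [findCommentA, hq, hch]
          rw [hA, findCommentB]
          simp only [if_neg hch, if_neg hq]
          exact ih rest (by simp at hl; omega) (i+1) sc

theorem findCommentA_eq_B (l : List Char) (i : Int) (sc : Option Char) :
    findCommentA l i false sc = findCommentB l i :=
  findCommentA_eq_B_aux l.length l le_rfl i sc

-- ===== VERDICT (by name: the statement is the Claim_ definition above) =====
theorem find_comment_py_spec : Claim_equal_find_comment_py := by
  intro s _
  unfold Spec_find_comment_py find_comment_py find_comment_py_alt
  exact findCommentA_eq_B s.toList 0 none
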